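-- pv_equiv track=rewrite | github.com/a101e-lab/IoTFuzzBench | fuzzer/snipuzz/Snipuzz.py | extract_snippet_pool_data_list
-- ===== SOURCE A (Python) =====
-- def extract_snippet_pool_data_list(response_dict, snippet_pool):
--     # 从snippet_pool中，提取需要变异的 snippet 数据列表
--
--     ori_data_str = response_dict['ori_data_str']
--     mutation_data_pool = []
--
--     for snippet in snippet_pool:
--         mutation_data = []
--         posi_flag = 0
--         for snip in snippet:
--             sni_data = ori_data_str[posi_flag:posi_flag + len(snippet[snip]['snippet_position'])]
--             posi_flag = posi_flag + len(snippet[snip]['snippet_position'])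
--             mutation_data.append(sni_data)
--         mutation_data_pool.append(mutation_data)
--     return mutation_data_pool
-- ===== SOURCE B (Python) =====
-- def extract_snippet_pool_data_list(response_dict, snippet_pool):
--     # Re-implementation: per snippet, build an explicit offset table (prefix sums
--     # of the snippet_position lengths) first, then slice in one comprehension pass.
--     ori_data_str = response_dict['ori_data_str']
--     mutation_data_pool = []
--     for snippet in snippet_pool:
--         lens = [len(snippet[snip]['snippet_position']) for snip in snippet]
--         starts = [sum(lens[:i]) for i in range(len(lens))]
--         ends = [s + l for s, l in zip(starts, lens)]
--         mutation_data_pool.append([ori_data_str[s:e] for s, e in zip(starts, ends)])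
--     return mutation_data_pool
-- ===== Notes on version B (the rewrite author's own statement) =====
-- stated objective: alternative
-- what changed: Replaces the running posi_flag accumulator with an explicit offset table: per snippet it first collects the segment lengths, computes start offsets as prefix sums and end offsets by pairing, then produces every substring in a single comprehension over the (start, end) pairs.
import Mathlib
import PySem

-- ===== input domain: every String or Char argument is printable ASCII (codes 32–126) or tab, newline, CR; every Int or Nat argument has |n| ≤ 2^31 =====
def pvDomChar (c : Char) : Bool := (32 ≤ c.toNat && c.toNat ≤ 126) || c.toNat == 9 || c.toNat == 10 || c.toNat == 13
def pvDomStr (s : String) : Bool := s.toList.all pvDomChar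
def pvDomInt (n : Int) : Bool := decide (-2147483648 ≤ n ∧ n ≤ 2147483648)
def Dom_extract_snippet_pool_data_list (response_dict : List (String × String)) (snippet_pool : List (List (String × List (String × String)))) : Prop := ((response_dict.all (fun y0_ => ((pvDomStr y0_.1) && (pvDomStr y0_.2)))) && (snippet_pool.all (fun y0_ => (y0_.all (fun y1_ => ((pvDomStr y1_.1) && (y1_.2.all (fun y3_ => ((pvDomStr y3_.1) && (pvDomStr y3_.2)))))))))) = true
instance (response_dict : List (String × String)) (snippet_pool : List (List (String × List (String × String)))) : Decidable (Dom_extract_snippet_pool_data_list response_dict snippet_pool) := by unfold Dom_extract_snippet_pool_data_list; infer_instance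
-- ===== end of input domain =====

-- B replaces A's running posi_flag accumulator with an explicit offset table
-- (prefix sums of segment lengths) computed before a single slicing pass;
-- objective: alternative decomposition, no speed claim.

-- ===== PORT A =====
-- A: for each snippet dict, walk its keys keeping a running offset posi_flag,
-- appending ori_data_str[posi_flag : posi_flag + len(snippet[snip]['snippet_position'])].
def extract_snippet_pool_data_list (response_dict : List (String × String)) (snippet_pool : List (List (String × List (String × String)))) : List (List String) :=
  -- response_dict['ori_data_str']: KeyError when absent, excluded by Pre_ (getD "" is dead there)
  let ori_data_str := (PySem.Dict.get? (PySem.Dict.ofList response_dict) "ori_data_str").getD ""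
  snippet_pool.foldl (fun mutation_data_pool snippet =>
    let sd := PySem.Dict.ofList snippet
    let st := sd.keys.foldl (fun (acc : List String × Int) snip =>
      -- snippet[snip]['snippet_position']: KeyError when absent, excluded by Pre_
      let l : Int := PySem.Str.len ((PySem.Dict.get? (PySem.Dict.ofList (sd.getD snip [])) "snippet_position").getD "")
      (acc.1 ++ [PySem.Str.slice ori_data_str (some acc.2) (some (acc.2 + l))], acc.2 + l)) ([], 0)
    mutation_data_pool ++ [st.1]) []

-- ===== PORT B =====
-- B: per snippet, the list of lengths, then starts = prefix sums, ends = starts + lens,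
-- then one slicing pass over zip(starts, ends).
def extract_snippet_pool_data_list_alt (response_dict : List (String × String)) (snippet_pool : List (List (String × List (String × String)))) : List (List String) :=
  let ori_data_str := (PySem.Dict.get? (PySem.Dict.ofList response_dict) "ori_data_str").getD ""
  snippet_pool.map (fun snippet =>
    let sd := PySem.Dict.ofList snippet
    let lens : List Int := sd.keys.map (fun snip =>
      PySem.Str.len ((PySem.Dict.get? (PySem.Dict.ofList (sd.getD snip [])) "snippet_position").getD ""))
    let starts := (List.range lens.length).map (fun i => (lens.take i).sum)
    let ends := (starts.zip lens).map (fun p => p.1 + p.2)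
    (starts.zip ends).map (fun p => PySem.Str.slice ori_data_str (some p.1) (some p.2)))

-- ===== PRECONDITION & SPEC =====
-- Pre_ excludes exactly the inputs on which the Python A raises KeyError:
-- a response_dict without the key 'ori_data_str', or a snippet entry whose
-- value dict lacks the key 'snippet_position' (B raises there too).
def Pre_extract_snippet_pool_data_list (response_dict : List (String × String)) (snippet_pool : List (List (String × List (String × String)))) : Prop :=
  "ori_data_str" ∈ response_dict.map Prod.fst ∧
  ∀ snippet ∈ snippet_pool, ∀ kv ∈ (PySem.Dict.ofList snippet).items,
    "snippet_position" ∈ kv.2.map Prod.fst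
instance (response_dict : List (String × String)) (snippet_pool : List (List (String × List (String × String)))) : Decidable (Pre_extract_snippet_pool_data_list response_dict snippet_pool) := by unfold Pre_extract_snippet_pool_data_list; infer_instance
def pvWitness_extract_snippet_pool_data_list : (List (String × String)) × (List (List (String × List (String × String)))) :=
  ([("ori_data_str", "abcdef")],
   [[("k1", [("snippet_position", "ab")]), ("k2", [("snippet_position", "c")])], []])
def Spec_extract_snippet_pool_data_list (response_dict : List (String × String)) (snippet_pool : List (List (String × List (String × String)))) (out : List (List String)) : Prop := out = extract_snippet_pool_data_list_alt response_dict snippet_pool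
instance (response_dict : List (String × String)) (snippet_pool : List (List (String × List (String × String)))) (out : List (List String)) : Decidable (Spec_extract_snippet_pool_data_list response_dict snippet_pool out) := by unfold Spec_extract_snippet_pool_data_list; infer_instance

-- ===== CLAIM (what is proved, stated in full; the proofs are below) =====
def Claim_equal_extract_snippet_pool_data_list : Prop := ∀ (response_dict : List (String × String)) (snippet_pool : List (List (String × List (String × String)))), Dom_extract_snippet_pool_data_list response_dict snippet_pool → Pre_extract_snippet_pool_data_list response_dict snippet_pool → Spec_extract_snippet_pool_data_list response_dict snippet_pool (extract_snippet_pool_data_list response_dict snippet_pool)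

-- ===== LEMMAS AND PROOFS =====

-- the common value of one snippet's segment list: slices at running offset c
def pvSegs (s : String) : Int → List Int → List String
  | _, [] => []
  | c, l :: ls => PySem.Str.slice s (some c) (some (c + l)) :: pvSegs s (c + l) ls

theorem pvA_inner (s : String) (lens : List Int) :
    ∀ (acc : List String) (c : Int),
      (lens.foldl (fun (acc : List String × Int) l =>
        (acc.1 ++ [PySem.Str.slice s (some acc.2) (some (acc.2 + l))], acc.2 + l)) (acc, c)).1
      = acc ++ pvSegs s c lens := by
  induction lens with
  | nil => intro acc c; simp [pvSegs]
  | cons l ls ih =>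
      intro acc c
      simp only [List.foldl_cons, pvSegs, ih]
      simp

theorem pvB_inner (s : String) (lens : List Int) :
    ∀ (c : Int),
      let starts := (List.range lens.length).map (fun i => c + (lens.take i).sum)
      let ends := (starts.zip lens).map (fun p => p.1 + p.2)
      (starts.zip ends).map (fun p => PySem.Str.slice s (some p.1) (some p.2)) = pvSegs s c lens := by
  induction lens with
  | nil => intro c; simp [pvSegs]
  | cons l ls ih =>
      intro c
      have hst : List.map ((fun i => c + (List.take i (l :: ls)).sum) ∘ Nat.succ) (List.range ls.length)
          = List.map (fun i => c + l + (List.take i ls).sum) (List.range ls.length) := by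
        apply List.map_congr_left
        intro i _
        simp [Function.comp, List.take_succ_cons]
        ring
      simp only [List.length_cons, List.range_succ_eq_map, List.map_cons, List.map_map,
        List.take_zero, List.sum_nil, List.zip_cons_cons, pvSegs, hst, add_zero]
      have := ih (c + l)
      simp only at this
      rw [this]

theorem extract_snippet_pool_data_list_eq (response_dict : List (String × String)) (snippet_pool : List (List (String × List (String × String)))) :
    extract_snippet_pool_data_list response_dict snippet_pool
      = extract_snippet_pool_data_list_alt response_dict snippet_pool := by
  unfold extract_snippet_pool_data_list extract_snippet_pool_data_list_alt
  simp only []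
  rw [PySem.List.foldl_append_singleton_eq_map]
  simp only [List.nil_append]
  apply List.map_congr_left
  intro snippet _
  set s := (PySem.Dict.get? (PySem.Dict.ofList response_dict) "ori_data_str").getD "" with hs
  set sd := PySem.Dict.ofList snippet with hsd
  set lenOf := fun snip =>
      PySem.Str.len ((PySem.Dict.get? (PySem.Dict.ofList (sd.getD snip [])) "snippet_position").getD "") with hlen
  have ha : (sd.keys.foldl (fun (acc : List String × Int) snip =>
      (acc.1 ++ [PySem.Str.slice s (some acc.2) (some (acc.2 + lenOf snip))], acc.2 + lenOf snip)) ([], 0)).1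
      = pvSegs s 0 (sd.keys.map lenOf) := by
    rw [← List.foldl_map (f := lenOf)
      (g := fun (acc : List String × Int) l =>
        (acc.1 ++ [PySem.Str.slice s (some acc.2) (some (acc.2 + l))], acc.2 + l))]
    exact pvA_inner s (sd.keys.map lenOf) [] 0
  have hb := pvB_inner s (sd.keys.map lenOf) 0
  simp only [zero_add] at hb
  rw [ha, ← hb]

-- ===== VERDICT (by name: the statement is the Claim_ definition above) =====
theorem extract_snippet_pool_data_list_spec : Claim_equal_extract_snippet_pool_data_list := by
  intro response_dict snippet_pool _ _
  exact extract_snippet_pool_data_list_eq response_dict snippet_pool
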